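-- pv_equiv track=rewrite | github.com/OhJeMIN/algorithm | Programmers/Lv1/과일 장수/Ohjemin.py | solution
-- ===== SOURCE A (Python) =====
-- def solution(k, m, score):
--     answer = 0
--     tmp = []
--     for idx, i in enumerate(sorted(score,reverse=True)):
--         tmp.append(i)
--         if (idx+1) % m == 0:
--             answer += min(tmp)*len(tmp)
--             tmp.clear()
--     return answer
-- ===== SOURCE B (Python) =====
-- def solution(k, m, score):
--     s = sorted(score, reverse=True)
--     return sum(s[i] * m for i in range(m - 1, len(s), m))
-- ===== Notes on version B (the rewrite author's own statement) =====
-- stated objective: simpler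
-- what changed: B replaces A's running buffer + min() reduction with direct strided indexing into the descending-sorted list: the minimum of each full m-group is the element at index m-1, 2m-1, ..., so B sums s[i]*m over range(m-1, len(s), m) with no buffer, no appends and no min pass.
-- outside the precondition, e.g. on solution(0, -1, [1, 2]): A returns 3, B returns 0; on solution(0, 0, []): A returns 0, B raises ValueError
import Mathlib
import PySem

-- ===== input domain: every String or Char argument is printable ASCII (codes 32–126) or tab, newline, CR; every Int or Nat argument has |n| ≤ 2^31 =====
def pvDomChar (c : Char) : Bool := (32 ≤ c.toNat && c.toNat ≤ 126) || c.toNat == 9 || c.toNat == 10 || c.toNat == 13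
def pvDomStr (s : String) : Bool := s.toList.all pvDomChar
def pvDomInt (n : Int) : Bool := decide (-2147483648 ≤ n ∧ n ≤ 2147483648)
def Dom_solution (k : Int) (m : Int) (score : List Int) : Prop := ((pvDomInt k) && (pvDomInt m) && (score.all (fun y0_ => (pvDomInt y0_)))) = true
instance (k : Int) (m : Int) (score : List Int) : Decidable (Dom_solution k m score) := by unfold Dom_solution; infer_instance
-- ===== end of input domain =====

-- B replaces A's group buffer + min() reduction by strided indexing into the sorted list (objective: simpler).

-- ===== PORT A =====
-- loop body of A's for-loop: tmp.append(i); if (idx+1) % m == 0: answer += min(tmp)*len(tmp); tmp.clear()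
def solutionStep (m : Int) (p : Int × List Int) (e : Int × Int) : Int × List Int :=
  if PySem.Int.mod (e.1 + 1) m = 0 then
    (p.1 + ((PySem.List.min? (p.2 ++ [e.2]) (fun y => y)).getD 0) * ((p.2 ++ [e.2]).length : Int), [])
  else (p.1, p.2 ++ [e.2])

def solution (k : Int) (m : Int) (score : List Int) : Int :=
  ((PySem.List.enumerate (PySem.List.sorted score (fun x => x) true) 0).foldl
    (solutionStep m) (0, [])).1

-- ===== PORT B =====
def solution_alt (k : Int) (m : Int) (score : List Int) : Int :=
  let s := PySem.List.sorted score (fun x => x) true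
  (PySem.List.pyRange (m - 1) (s.length : Int) m).foldl
    (fun acc i => acc + ((PySem.List.pyGet? s i).getD 0) * m) 0

-- ===== PRECONDITION & SPEC =====
-- Pre_ restricts to the natural domain m ≥ 1 (group size): for m = 0 A raises ZeroDivisionError on any
-- nonempty score (and B raises ValueError), and for m < 0 A's value (every element its own group) is an
-- accident of Python's negative modulus that B does not reproduce.
def Pre_solution (k : Int) (m : Int) (score : List Int) : Prop := 1 ≤ m
instance (k : Int) (m : Int) (score : List Int) : Decidable (Pre_solution k m score) := by
  unfold Pre_solution; infer_instance

def pvWitness_solution : Int × Int × List Int := (4, 3, [1, 2, 3, 1, 2])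

def Spec_solution (k : Int) (m : Int) (score : List Int) (out : Int) : Prop := out = solution_alt k m score
instance (k : Int) (m : Int) (score : List Int) (out : Int) : Decidable (Spec_solution k m score out) := by unfold Spec_solution; infer_instance

-- ===== CLAIM (what is proved, stated in full; the proofs are below) =====
def Claim_equal_solution : Prop := ∀ (k : Int) (m : Int) (score : List Int), Dom_solution k m score → Pre_solution k m score → Spec_solution k m score (solution k m score)

-- ===== LEMMAS AND PROOFS =====

-- common specification: walk s with a countdown c to the next group boundary; at the boundary
-- contribute x * m (the current element is the group minimum since s descends)
def fspec (m : Int) : Nat → List Int → Int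
  | _, [] => 0
  | c, x :: xs => if c = 1 then x * m + fspec m m.toNat xs else fspec m (c - 1) xs

theorem min_getD_last (tmp : List Int) (x : Int)
    (h : (tmp ++ [x]).Pairwise (fun a b => b ≤ a)) :
    (PySem.List.min? (tmp ++ [x]) (fun y => y)).getD 0 = x := by
  obtain ⟨v, hv⟩ : ∃ v, PySem.List.min? (tmp ++ [x]) (fun y => y) = some v := by
    cases hmin : PySem.List.min? (tmp ++ [x]) (fun y => y) with
    | none => exact absurd ((PySem.List.min?_eq_none_iff _ _).mp hmin) (by simp)
    | some v => exact ⟨v, rfl⟩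
  have hle : v ≤ x := PySem.List.min?_isMin hv x (by simp)
  have hmem : v ∈ tmp ++ [x] := PySem.List.min?_mem hv
  have hge : x ≤ v := by
    rcases List.mem_append.mp hmem with hmem | hmem
    · exact (List.pairwise_append.mp h).2.2 v hmem x (by simp)
    · simp at hmem; omega
  rw [hv]; simp; omega

theorem pyGet?_cons_succ (x : Int) (xs : List Int) (i : Int) (hi : 0 ≤ i) :
    PySem.List.pyGet? (x :: xs) (i + 1) = PySem.List.pyGet? xs i := by
  simp only [PySem.List.pyGet?, PySem.List.pyIdx?, List.length_cons]
  rw [if_pos (by omega : (0:Int) ≤ i + 1), if_pos hi]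
  by_cases h2 : i < (xs.length : Int)
  · rw [if_pos (by push_cast; omega), if_pos h2]
    have ht : (i + 1).toNat = i.toNat + 1 := by omega
    simp [ht]
  · rw [if_neg (by push_cast; omega), if_neg h2]
    simp

theorem pyRange_shift (a b m : Int) (hm : 0 < m) :
    PySem.List.pyRange (a + 1) (b + 1) m = (PySem.List.pyRange a b m).map (· + 1) := by
  rw [PySem.List.pyRange_of_pos _ _ hm, PySem.List.pyRange_of_pos _ _ hm, List.map_map]
  by_cases h : a < b
  · rw [if_pos (by omega), if_pos h]
    have hc : (b + 1 - (a + 1) + m - 1) = (b - a + m - 1) := by ring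
    rw [hc]
    exact List.map_congr_left (fun k _ => by simp; ring)
  · rw [if_neg (by omega), if_neg h]; simp

theorem pyRange_pos_cons (a b m : Int) (hm : 0 < m) (hab : a < b) :
    PySem.List.pyRange a b m = a :: PySem.List.pyRange (a + m) b m := by
  rw [PySem.List.pyRange_of_pos _ _ hm, PySem.List.pyRange_of_pos _ _ hm]
  have key : ((b - a + m - 1) / m).toNat = ((if a + m < b then ((b - (a + m) + m - 1) / m).toNat else 0)) + 1 := by
    by_cases h2 : a + m < b
    · rw [if_pos h2]
      have e1 : b - a + m - 1 = (b - (a + m) + m - 1) + 1 * m := by ring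
      rw [e1, Int.add_mul_ediv_right _ _ (by omega)]
      have h0 : 0 ≤ (b - (a + m) + m - 1) / m := Int.ediv_nonneg (by omega) (by omega)
      omega
    · rw [if_neg h2]
      have e1 : b - a + m - 1 = (b - a - 1) + 1 * m := by ring
      rw [e1, Int.add_mul_ediv_right _ _ (by omega)]
      have h0 : (b - a - 1) / m = 0 := Int.ediv_eq_zero_of_lt (by omega) (by omega)
      omega
  rw [if_pos hab, key, List.range_succ_eq_map, List.map_cons, List.map_map]
  congr 1
  · simp
  · exact List.map_congr_left (fun k _ => by simp [Nat.succ_eq_add_one]; push_cast; ring)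

theorem A_loop (m : Int) (hm : 1 ≤ m) (s : List Int) :
    ∀ (tmp : List Int) (answer idx : Int) (r : Nat),
    ((tmp ++ s).Pairwise (fun a b => b ≤ a)) →
    tmp.length = r → (r : Int) < m → 0 ≤ idx → idx % m = (r : Int) →
    ((PySem.List.enumerate s idx).foldl (solutionStep m) (answer, tmp)).1
      = answer + fspec m (m.toNat - r) s := by
  induction s with
  | nil => intro tmp answer idx r _ _ _ _ _; simp [PySem.List.enumerate, fspec]
  | cons x xs ih =>
    intro tmp answer idx r hpair hlen hr hidx hmod
    rw [List.append_cons] at hpair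
    have hpx : (tmp ++ [x]).Pairwise (fun a b => b ≤ a) := (List.pairwise_append.mp hpair).1
    rw [PySem.List.enumerate_cons, List.foldl_cons]
    have hmodeq : PySem.Int.mod (idx + 1) m = (idx + 1) % m := by
      simp only [PySem.Int.mod]
      exact Int.fmod_eq_emod_of_nonneg _ (by omega)
    have h1 : (idx + 1) % m = ((r : Int) + 1) % m := by
      rw [Int.add_emod idx 1 m, Int.add_emod ((r : Int)) 1 m, ← hmod,
        Int.emod_emod_of_dvd _ dvd_rfl]
    by_cases hrm : (r : Int) + 1 = m
    · -- boundary: the group is complete, r + 1 = m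
      have hb : (idx + 1) % m = 0 := by rw [h1, hrm, Int.emod_self]
      have hstep : solutionStep m (answer, tmp) (idx, x) = (answer + x * m, []) := by
        simp only [solutionStep, hmodeq]
        rw [if_pos hb, min_getD_last tmp x hpx]
        have hl : (((tmp ++ [x]).length : Nat) : Int) = (r : Int) + 1 := by
          simp [hlen]
        rw [hl, hrm]
      rw [hstep, ih [] (answer + x * m) (idx + 1) 0
        (by simpa using (List.pairwise_append.mp hpair).2.1) rfl (by omega) (by omega) (by omega)]
      have hc : m.toNat - r = 1 := by omega
      rw [hc]
      simp [fspec]; ring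
    · -- not a boundary: the group keeps growing
      have hb : (idx + 1) % m = (r : Int) + 1 := by
        rw [h1]; exact Int.emod_eq_of_lt (by omega) (by omega)
      have hstep : solutionStep m (answer, tmp) (idx, x) = (answer, tmp ++ [x]) := by
        simp only [solutionStep, hmodeq]
        rw [if_neg (by omega)]
      rw [hstep, ih (tmp ++ [x]) answer (idx + 1) (r + 1) hpair (by simp [hlen]) (by omega)
        (by omega) (by push_cast; omega)]
      have hc : m.toNat - r ≠ 1 := by omega
      have hc2 : m.toNat - (r + 1) = (m.toNat - r) - 1 := by omega
      simp [fspec, hc, hc2]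

theorem B_loop (m : Int) (hm : 1 ≤ m) (s : List Int) :
    ∀ (c : Nat) (acc : Int), 1 ≤ c →
    (PySem.List.pyRange ((c : Int) - 1) (s.length : Int) m).foldl
      (fun a i => a + ((PySem.List.pyGet? s i).getD 0) * m) acc
      = acc + fspec m c s := by
  induction s with
  | nil =>
    intro c acc hc
    have h : ¬((c : Int) - 1 < (([] : List Int).length : Int)) := by simp; omega
    rw [PySem.List.pyRange_of_pos _ _ (by omega : (0:Int) < m), if_neg h]
    simp [fspec]
  | cons x xs ih =>
    intro c acc hc
    by_cases hc1 : c = 1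
    · subst hc1
      have h0 : ((1 : Nat) : Int) - 1 = 0 := by norm_num
      have hpos : (0 : Int) < ((x :: xs).length : Int) := by
        have h' : 0 < (x :: xs).length := by simp
        exact_mod_cast h'
      rw [h0, pyRange_pos_cons 0 ((x :: xs).length : Int) m (by omega) hpos, List.foldl_cons]
      have hget : (PySem.List.pyGet? (x :: xs) 0).getD 0 = x := by
        simp [PySem.List.pyGet?, PySem.List.pyIdx?]
      rw [hget]
      have hshift : PySem.List.pyRange (0 + m) ((x :: xs).length : Int) m
          = (PySem.List.pyRange (m - 1) ((xs.length : Int)) m).map (· + 1) := by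
        have e1 : (0 : Int) + m = (m - 1) + 1 := by ring
        have e2 : (((x :: xs).length : Nat) : Int) = (xs.length : Int) + 1 := by push_cast; simp
        rw [e1, e2, pyRange_shift _ _ _ (by omega)]
      rw [hshift, List.foldl_map]
      have hcong : ∀ (a : Int), ∀ i ∈ PySem.List.pyRange (m - 1) ((xs.length : Int)) m,
          a + ((PySem.List.pyGet? (x :: xs) (i + 1)).getD 0) * m
            = a + ((PySem.List.pyGet? xs i).getD 0) * m := by
        intro a i hi
        have hmem := (PySem.List.mem_pyRange_iff_of_pos (by omega : (0:Int) < m) i).mp hi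
        rw [pyGet?_cons_succ x xs i (by omega)]
      rw [PySem.List.foldl_congr_mem _ _ _ _ hcong]
      have hmn : ((m.toNat : Int)) - 1 = m - 1 := by omega
      rw [← hmn, ih m.toNat (acc + x * m) (by omega)]
      simp [fspec]; ring
    · have hc2 : 2 ≤ c := by omega
      have hsplit : ((c : Int) - 1) = (((c - 1 : Nat) : Int) - 1) + 1 := by push_cast; omega
      have hlen : (((x :: xs).length : Nat) : Int) = (xs.length : Int) + 1 := by push_cast; simp
      rw [hsplit, hlen, pyRange_shift _ _ _ (by omega), List.foldl_map]
      have hcong : ∀ (a : Int), ∀ i ∈ PySem.List.pyRange (((c - 1 : Nat) : Int) - 1) ((xs.length : Int)) m,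
          a + ((PySem.List.pyGet? (x :: xs) (i + 1)).getD 0) * m
            = a + ((PySem.List.pyGet? xs i).getD 0) * m := by
        intro a i hi
        have hmem := (PySem.List.mem_pyRange_iff_of_pos (by omega : (0:Int) < m) i).mp hi
        rw [pyGet?_cons_succ x xs i (by push_cast at hmem ⊢; omega)]
      rw [PySem.List.foldl_congr_mem _ _ _ _ hcong, ih (c - 1) acc (by omega)]
      simp [fspec, hc1]

-- ===== VERDICT (by name: the statement is the Claim_ definition above) =====
theorem solution_spec : Claim_equal_solution := by
  intro k m score _ hpre
  unfold Spec_solution solution solution_alt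
  have hm : 1 ≤ m := hpre
  set s := PySem.List.sorted score (fun x => x) true with hs
  have hpair : s.Pairwise (fun a b => b ≤ a) := by
    simpa using PySem.List.sorted_pairwise_rev score (fun x => x)
  rw [A_loop m hm s [] 0 0 0 (by simpa using hpair) rfl (by omega) le_rfl (by simp)]
  have hmn : ((m.toNat : Int)) - 1 = m - 1 := by omega
  rw [← hmn, B_loop m hm s m.toNat 0 (by omega)]
  simp
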